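-- pv_equiv track=rewrite | github.com/evanc108/RevenuecatShipyard | backend/app/services/recipe_populator.py | _matches_dietary_restrictions
-- ===== SOURCE A (Python) =====
-- def _matches_dietary_restrictions(category: str, restrictions: list[str] | None) -> bool:
--     """Check if meal category matches dietary restrictions."""
--     if not restrictions:
--         return True
--
--     category_lower = category.lower()
--
--     for restriction in restrictions:
--         r = restriction.lower()
--
--         if r == "vegetarian":
--             meat_categories = ["beef", "chicken", "lamb", "pork", "goat", "seafood"]
--             if any(c in category_lower for c in meat_categories):
--                 return False
--
--         if r == "vegan":
--             non_vegan_categories = ["beef", "chicken", "lamb", "pork", "goat", "seafood", "dessert"]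
--             if any(c in category_lower for c in non_vegan_categories):
--                 return False
--
--     return True
-- ===== SOURCE B (Python) =====
-- def _matches_dietary_restrictions(category: str, restrictions: list[str] | None) -> bool:
--     """Check if meal category matches dietary restrictions.
--
--     Strictness-lattice formulation: restrictions collapse to a single numeric
--     strictness level (none=0 < vegetarian=1 < vegan=2, taking the max), the
--     category is classified once by the maximal strictness it tolerates
--     (meat tolerates 0, dessert tolerates 1, anything else tolerates 2),
--     and the answer is a single numeric comparison.
--     """
--     if not restrictions:
--         return True
--
--     strictness = 0
--     for r in restrictions:
--         rl = r.lower()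
--         strictness = max(strictness, 2 if rl == "vegan" else 1 if rl == "vegetarian" else 0)
--
--     cl = category.lower()
--     if any(m in cl for m in ("beef", "chicken", "lamb", "pork", "goat", "seafood")):
--         tolerance = 0
--     elif "dessert" in cl:
--         tolerance = 1
--     else:
--         tolerance = 2
--
--     return strictness <= tolerance
-- ===== Notes on version B (the rewrite author's own statement) =====
-- stated objective: alternative
-- what changed: B replaces A's per-restriction keyword-list substring scanning with a numeric strictness lattice: restrictions are folded into one max strictness level (0/1/2), the category is classified once into a tolerance level, and the result is a single integer comparison.
import Mathlib
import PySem

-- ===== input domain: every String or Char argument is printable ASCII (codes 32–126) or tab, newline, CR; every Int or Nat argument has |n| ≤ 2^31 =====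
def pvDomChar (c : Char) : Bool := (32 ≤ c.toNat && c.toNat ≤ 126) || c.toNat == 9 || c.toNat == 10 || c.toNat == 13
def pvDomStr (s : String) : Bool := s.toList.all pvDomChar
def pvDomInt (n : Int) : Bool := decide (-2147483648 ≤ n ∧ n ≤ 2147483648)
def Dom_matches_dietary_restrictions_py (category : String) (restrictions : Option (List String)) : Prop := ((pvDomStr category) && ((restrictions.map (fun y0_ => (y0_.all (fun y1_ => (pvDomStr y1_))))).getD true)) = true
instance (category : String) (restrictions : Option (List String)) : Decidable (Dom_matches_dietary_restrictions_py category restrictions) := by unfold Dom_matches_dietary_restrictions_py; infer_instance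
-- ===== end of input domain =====

-- B replaces A's per-restriction keyword scanning with a numeric strictness lattice (max restriction level vs category tolerance level); an alternative decomposition, not claimed faster.

-- ===== PORT A =====
-- A's helper for `any(c in category_lower for c in cats)`.
def pvAnyIn (cs : List String) (s : String) : Bool := cs.any (fun c => PySem.Str.isIn c s)

-- A's loop over the restrictions, checking the category against each restriction's keyword list in turn.
def pvALoop (categoryLower : String) : List String → Bool
  | [] => true
  | restriction :: rest =>
    let r := PySem.Str.lower restriction
    if r == "vegetarian" &&
        pvAnyIn ["beef", "chicken", "lamb", "pork", "goat", "seafood"] categoryLower then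
      false
    else if r == "vegan" &&
        pvAnyIn ["beef", "chicken", "lamb", "pork", "goat", "seafood", "dessert"] categoryLower then
      false
    else
      pvALoop categoryLower rest

def matches_dietary_restrictions_py (category : String) (restrictions : Option (List String)) : Bool :=
  match restrictions with
  | none => true
  | some rs =>
    if rs.isEmpty then true
    else pvALoop (PySem.Str.lower category) rs

-- ===== PORT B =====
-- B's loop: fold the restrictions into a single max strictness level (vegan=2, vegetarian=1, else 0).
def pvStrict : Nat → List String → Nat
  | acc, [] => acc
  | acc, r :: rest =>
    let rl := PySem.Str.lower r
    pvStrict (max acc (if rl == "vegan" then 2 else if rl == "vegetarian" then 1 else 0)) rest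

def matches_dietary_restrictions_py_alt (category : String) (restrictions : Option (List String)) : Bool :=
  match restrictions with
  | none => true
  | some rs =>
    if rs.isEmpty then true
    else
      let strictness := pvStrict 0 rs
      let cl := PySem.Str.lower category
      let tolerance : Nat :=
        if ["beef", "chicken", "lamb", "pork", "goat", "seafood"].any (fun m => PySem.Str.isIn m cl) then 0
        else if PySem.Str.isIn "dessert" cl then 1
        else 2
      decide (strictness ≤ tolerance)

-- ===== PRECONDITION & SPEC =====
def Spec_matches_dietary_restrictions_py (category : String) (restrictions : Option (List String)) (out : Bool) : Prop := out = matches_dietary_restrictions_py_alt category restrictions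
instance (category : String) (restrictions : Option (List String)) (out : Bool) : Decidable (Spec_matches_dietary_restrictions_py category restrictions out) := by unfold Spec_matches_dietary_restrictions_py; infer_instance

-- ===== CLAIM (what is proved, stated in full; the proofs are below) =====
def Claim_equal_matches_dietary_restrictions_py : Prop := ∀ (category : String) (restrictions : Option (List String)), Dom_matches_dietary_restrictions_py category restrictions → Spec_matches_dietary_restrictions_py category restrictions (matches_dietary_restrictions_py category restrictions)

-- ===== LEMMAS AND PROOFS =====

-- A's loop result characterised: false iff some (lowered) restriction is "vegetarian" and a
-- meat keyword occurs in the category, or some is "vegan" and a meat/dessert keyword occurs.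
theorem pvALoop_eq (cat : String) (rs : List String) :
    pvALoop cat rs =
      !((rs.any (fun x => PySem.Str.lower x == "vegetarian") &&
          pvAnyIn ["beef", "chicken", "lamb", "pork", "goat", "seafood"] cat) ||
        (rs.any (fun x => PySem.Str.lower x == "vegan") &&
          pvAnyIn ["beef", "chicken", "lamb", "pork", "goat", "seafood", "dessert"] cat)) := by
  generalize hm : pvAnyIn ["beef", "chicken", "lamb", "pork", "goat", "seafood"] cat = m
  generalize hn : pvAnyIn ["beef", "chicken", "lamb", "pork", "goat", "seafood", "dessert"] cat = n
  induction rs with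
  | nil => simp [pvALoop]
  | cons r rest ih =>
    simp only [pvALoop, List.any_cons, hm, hn]
    cases h1 : (PySem.Str.lower r == "vegetarian") <;>
      cases h2 : (PySem.Str.lower r == "vegan") <;>
        cases m <;> cases n <;> simp_all

-- B's fold characterised: the max strictness is 2 if some restriction lowers to "vegan",
-- else 1 if some lowers to "vegetarian", else 0.
theorem pvStrict_eq (acc : Nat) (rs : List String) :
    pvStrict acc rs =
      max acc (if rs.any (fun x => PySem.Str.lower x == "vegan") then 2
               else if rs.any (fun x => PySem.Str.lower x == "vegetarian") then 1
               else 0) := by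
  induction rs generalizing acc with
  | nil => simp [pvStrict]
  | cons r rest ih =>
    simp only [pvStrict, List.any_cons, ih]
    by_cases h1 : (PySem.Str.lower r == "vegan") = true <;>
      by_cases h2 : (PySem.Str.lower r == "vegetarian") = true <;>
        by_cases h3 : (rest.any (fun x => PySem.Str.lower x == "vegan")) = true <;>
          by_cases h4 : (rest.any (fun x => PySem.Str.lower x == "vegetarian")) = true <;>
            simp [h1, h2, h3, h4] <;> omega

-- ===== VERDICT (by name: the statement is the Claim_ definition above) =====
theorem matches_dietary_restrictions_py_spec : Claim_equal_matches_dietary_restrictions_py := by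
  intro category restrictions _
  unfold Spec_matches_dietary_restrictions_py
  unfold matches_dietary_restrictions_py matches_dietary_restrictions_py_alt
  cases restrictions with
  | none => rfl
  | some rs =>
    by_cases h : rs.isEmpty
    · simp [h]
    · simp only [h, Bool.false_eq_true, if_false]
      rw [pvALoop_eq, pvStrict_eq]
      simp only [pvAnyIn,
        show (["beef", "chicken", "lamb", "pork", "goat", "seafood", "dessert"] : List String)
            = ["beef", "chicken", "lamb", "pork", "goat", "seafood"] ++ ["dessert"] from rfl,
        List.any_append]
      cases hv : rs.any (fun x => PySem.Str.lower x == "vegetarian") <;>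
        cases hg : rs.any (fun x => PySem.Str.lower x == "vegan") <;>
          cases hm : (["beef", "chicken", "lamb", "pork", "goat", "seafood"] : List String).any
              (fun c => PySem.Str.isIn c (PySem.Str.lower category)) <;>
            cases hd : PySem.Str.isIn "dessert" (PySem.Str.lower category) <;>
              simp_all [List.any_nil]
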